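-- pv_equiv track=rewrite | github.com/noblematt/noblematt.github.io | wc-finals-draw/lib/qatardraw.py | draw_pot
-- ===== SOURCE A (Python) =====
-- def draw_pot(pot, groups=('', '', '', '', '', '', '', '')):
--     '''
--     Generate the state of the groups given teams coming out of the pot in the
--     sequence defined by `pot`
--     If the given sequence of teams cannot legally be placed, returns None
--     '''
--     # If no teams are left in the pot, we are finished
--     if not pot:
--         return groups
--
--     # Establish the size of an available group, and the number of teams from the
--     # next team's confederation that are allowed in a group
--     min_group_len = min(map(len, groups))
--     team = pot[0]
--     max_double_europes_reached = 5 == sum(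
--         sum(c == 'E' for c in g) == 2
--         for g in groups
--     )
--     max_count = 2 if (team == 'E' and not max_double_europes_reached) else 1
--
--     # Iterate over the groups, placing the team in the first legal group
--     for i, group in enumerate(groups):
--
--         # If the group is larger than the smallest, it already has a team from this pot
--         if len(group) > min_group_len:
--             continue
--
--         # If the group already has the maximum number of teams from this confederation, move on
--         if sum(c == team or (c in 'AS' and team == 'P') for c in group) >= max_count:
--             continue
--
--         # Construct the new groups and call this function with the remaining teams
--         new_groups = tuple(
--             g if i != j else g + team
--             for j, g in enumerate(groups)
--         )
--         result = draw_pot(pot[1:], new_groups)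
--
--         # If we can successfully assign the remaining teams, return the result
--         if result:
--             return result
-- ===== SOURCE B (Python) =====
-- def draw_pot(pot, groups=('', '', '', '', '', '', '', '')):
--     '''
--     Iterative DFS with an explicit stack of frames (pot suffix, groups, next
--     group index to try); returns the first complete legal placement, else None.
--     '''
--     stack = [(tuple(pot), tuple(groups), 0)]
--     while stack:
--         pot_s, gs, gi = stack.pop()
--         if not pot_s:
--             return gs
--         team = pot_s[0]
--         min_len = min(len(g) for g in gs)
--         mdr = 5 == sum(sum(c == 'E' for c in g) == 2 for g in gs)
--         max_count = 2 if (team == 'E' and not mdr) else 1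
--         j = gi
--         while j < len(gs) and (len(gs[j]) > min_len
--                 or sum(c == team or (c in 'AS' and team == 'P') for c in gs[j]) >= max_count):
--             j += 1
--         if j == len(gs):
--             continue  # no legal group from gi on: backtrack (discard frame)
--         stack.append((pot_s, gs, j + 1))
--         stack.append((pot_s[1:], gs[:j] + (gs[j] + team,) + gs[j + 1:], 0))
--     return None
-- ===== Notes on version B (the rewrite author's own statement) =====
-- stated objective: alternative
-- what changed: A's recursive backtracking is replaced by an explicit iterative DFS over a stack of (pot-suffix, groups, next-group-index) frames: each step pops a frame, scans for the first legal group from the remembered index, and pushes a resume frame plus a child frame, returning the first complete placement.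
import Mathlib
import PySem

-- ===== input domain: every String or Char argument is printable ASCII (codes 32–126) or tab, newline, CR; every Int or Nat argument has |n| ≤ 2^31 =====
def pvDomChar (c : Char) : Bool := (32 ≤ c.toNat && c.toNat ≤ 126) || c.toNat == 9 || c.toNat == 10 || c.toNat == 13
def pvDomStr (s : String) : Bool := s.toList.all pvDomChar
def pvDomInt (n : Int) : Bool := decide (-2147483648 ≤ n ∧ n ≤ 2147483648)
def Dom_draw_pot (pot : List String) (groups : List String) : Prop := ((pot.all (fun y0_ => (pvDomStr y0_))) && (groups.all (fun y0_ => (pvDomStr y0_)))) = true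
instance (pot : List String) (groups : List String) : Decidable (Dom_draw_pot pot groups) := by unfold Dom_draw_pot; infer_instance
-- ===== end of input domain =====

-- B replaces A's recursive backtracking by an explicit iterative DFS over a stack of
-- (pot-suffix, groups, next-group-index) frames; same first legal placement, no recursion (objective: alternative).

-- ===== PORT A =====
-- shared legality predicates (the same Python expressions appear verbatim in A and B)
def pvConfMatch (team : String) (c : Char) : Bool :=
  (String.ofList [c] == team) || (((c == 'A') || (c == 'S')) && (team == "P"))

-- sum(c == team or (c in 'AS' and team == 'P') for c in g)
def pvConfCount (team : String) (g : String) : Nat := g.toList.countP (pvConfMatch team)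

-- 5 == sum(sum(c == 'E' for c in g) == 2 for g in groups)
def pvMdr (groups : List String) : Bool := (groups.countP (fun g => g.toList.count 'E' == 2)) == 5

-- max_count = 2 if (team == 'E' and not max_double_europes_reached) else 1
def pvMaxCount (team : String) (groups : List String) : Int :=
  if team == "E" && !(pvMdr groups) then 2 else 1

mutual
def draw_pot (pot : List String) (groups : List String) : Option (List String) :=
  match pot with
  | [] => some groups
  | team :: rest =>
    match PySem.List.min? (groups.map PySem.Str.len) (fun x => x) with
    | none => none   -- Python: min() of an empty sequence raises ValueError; excluded by Pre_
    | some minLen =>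
      loopA team rest groups minLen (pvMaxCount team groups) (PySem.List.enumerate groups 0)
termination_by (pot.length, groups.length + 1)
decreasing_by exact Prod.Lex.right _ (Nat.lt_succ_of_le (Nat.le_of_eq (PySem.List.length_enumerate groups 0)))

-- the 'for i, group in enumerate(groups)' loop of A
def loopA (team : String) (rest : List String) (groups : List String)
    (minLen : Int) (maxCount : Int) (pairs : List (Int × String)) : Option (List String) :=
  match pairs with
  | [] => none
  | (i, group) :: tl =>
    if PySem.Str.len group > minLen then loopA team rest groups minLen maxCount tl
    else if (pvConfCount team group : Int) ≥ maxCount then loopA team rest groups minLen maxCount tl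
    else
      match draw_pot rest
          ((PySem.List.enumerate groups 0).map (fun p => if i ≠ p.1 then p.2 else p.2 ++ team)) with
      | some r => if r.isEmpty then loopA team rest groups minLen maxCount tl else some r
      | none => loopA team rest groups minLen maxCount tl
termination_by (rest.length + 1, pairs.length)
decreasing_by
  · exact Prod.Lex.right _ (Nat.lt_succ_self _)
  · exact Prod.Lex.right _ (Nat.lt_succ_self _)
  · exact Prod.Lex.left _ _ (Nat.lt_succ_self _)
  · exact Prod.Lex.right _ (Nat.lt_succ_self _)
end

-- ===== PORT B =====
-- the while-condition of Source B's inner scan: group already full for this pot, or at the confederation cap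
def pvIllegal (team : String) (minLen maxCount : Int) (g : String) : Bool :=
  decide (PySem.Str.len g > minLen) || decide ((pvConfCount team g : Int) ≥ maxCount)

-- the inner 'while j < len(gs) and (illegal)' scan of Source B
def scanB (team : String) (minLen maxCount : Int) (gs : List String) (j : Nat) : Option Nat :=
  if h : j < gs.length then
    if pvIllegal team minLen maxCount gs[j] then scanB team minLen maxCount gs (j + 1)
    else some j
  else none
termination_by gs.length - j
decreasing_by exact Nat.sub_succ_lt_self gs.length j h

-- weight of one DFS frame: an upper bound on the number of loop steps of Source B the frame can
-- still cause; draw_pot_alt passes it as fuel, so dfsB can recurse structurally on the fuel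
def pvFrameW (fr : List String × List String × Nat) : Nat :=
  (fr.2.1.length + 1 - min fr.2.2 (fr.2.1.length + 1)) * (fr.2.1.length + 3) ^ fr.1.length + 1

-- the 'while stack:' loop of Source B (fuel = a proved upper bound on the number of loop steps,
-- supplied by draw_pot_alt; the fuel-0 branch is never reached for that fuel — see dfsB_bridge)
def dfsB : Nat → List (List String × List String × Nat) → Option (List String)
  | 0, _ => none
  | _ + 1, [] => none
  | fuel + 1, (pots, gs, gi) :: tl =>
    match pots with
    | [] => some gs
    | team :: rest =>
      -- Source B raises ValueError on an empty gs (min of an empty sequence); such frames never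
      -- arise from a Pre_-admitted input, and the default 0 is never read (scanB returns none)
      let minLen := (PySem.List.min? (gs.map PySem.Str.len) (fun x => x)).getD 0
      match scanB team minLen (pvMaxCount team gs) gs gi with
      | none => dfsB fuel tl
      | some j =>
        dfsB fuel ((rest, gs.take j ++ (gs.getD j "" ++ team) :: gs.drop (j + 1), 0)
              :: (team :: rest, gs, j + 1) :: tl)

def draw_pot_alt (pot : List String) (groups : List String) : Option (List String) :=
  dfsB (pvFrameW (pot, groups, 0) + 1) [(pot, groups, 0)]

-- ===== PRECONDITION & SPEC =====
-- Pre_ excludes only (pot ≠ [] with groups = []), where A raises ValueError (min() of an empty sequence).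
def Pre_draw_pot (pot : List String) (groups : List String) : Prop := pot = [] ∨ groups ≠ []
instance (pot : List String) (groups : List String) : Decidable (Pre_draw_pot pot groups) := by unfold Pre_draw_pot; infer_instance
def pvWitness_draw_pot : List String × List String := (["E", "S"], ["", "", "", ""])

def Spec_draw_pot (pot : List String) (groups : List String) (out : Option (List String)) : Prop := out = draw_pot_alt pot groups
instance (pot : List String) (groups : List String) (out : Option (List String)) : Decidable (Spec_draw_pot pot groups out) := by unfold Spec_draw_pot; infer_instance

-- ===== CLAIM (what is proved, stated in full; the proofs are below) =====
def Claim_equal_draw_pot : Prop := ∀ (pot : List String) (groups : List String), Dom_draw_pot pot groups → Pre_draw_pot pot groups → Spec_draw_pot pot groups (draw_pot pot groups)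

-- ===== LEMMAS AND PROOFS =====

theorem scanB_bounds (team : String) (minLen maxCount : Int) (gs : List String) :
    ∀ j0 j : Nat, scanB team minLen maxCount gs j0 = some j → j0 ≤ j ∧ j < gs.length := by
  have H : ∀ n j0 j, gs.length ≤ j0 + n →
      scanB team minLen maxCount gs j0 = some j → j0 ≤ j ∧ j < gs.length := by
    intro n
    induction n with
    | zero =>
      intro j0 j hb h
      unfold scanB at h
      rw [dif_neg (by omega)] at h
      exact absurd h (by simp)
    | succ n ih =>
      intro j0 j hb h
      unfold scanB at h
      by_cases hlt : j0 < gs.length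
      · rw [dif_pos hlt] at h
        split_ifs at h with hc
        · have := ih (j0 + 1) j (by omega) h
          omega
        · cases h
          exact ⟨Nat.le_refl _, hlt⟩
      · rw [dif_neg hlt] at h
        exact absurd h (by simp)
  intro j0 j h
  exact H gs.length j0 j (by omega) h

theorem pvFrameW_dec (team : String) (rest gs gnew : List String) (gi j : Nat)
    (hlen : gnew.length = gs.length) (h1 : gi ≤ j) (h2 : j < gs.length) :
    pvFrameW (rest, gnew, 0) + pvFrameW (team :: rest, gs, j + 1)
      < pvFrameW (team :: rest, gs, gi) := by
  simp only [pvFrameW, hlen, List.length_cons]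
  have hX : 1 ≤ (gs.length + 3) ^ rest.length := Nat.one_le_pow _ _ (by omega)
  have hpow : (gs.length + 3) ^ (rest.length + 1) = (gs.length + 3) ^ rest.length * (gs.length + 3) := by ring
  rw [hpow]
  have m1 : min gi (gs.length + 1) = gi := by omega
  have m2 : min (j + 1) (gs.length + 1) = j + 1 := by omega
  have m3 : min 0 (gs.length + 1) = 0 := by omega
  rw [m1, m2, m3]
  have hge : (gs.length - j) + 1 ≤ gs.length + 1 - gi := by omega
  have key : ((gs.length - j) + 1) * ((gs.length + 3) ^ rest.length * (gs.length + 3))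
      ≤ (gs.length + 1 - gi) * ((gs.length + 3) ^ rest.length * (gs.length + 3)) :=
    Nat.mul_le_mul_right _ hge
  have hj : gs.length + 1 - (j + 1) = gs.length - j := by omega
  rw [hj]
  set X := (gs.length + 3) ^ rest.length with hXdef
  have expand : (gs.length - j + 1) * (X * (gs.length + 3))
      = (gs.length - j) * (X * (gs.length + 3)) + (gs.length + 1) * X + 2 * X := by ring
  simp only [Nat.sub_zero]
  linarith [key, hX, expand]



-- what one DFS frame is worth on the A side: A's loop restarted at index gi
def frameEval (pots gs : List String) (gi : Nat) : Option (List String) :=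
  match pots with
  | [] => some gs
  | team :: rest =>
    loopA team rest gs ((PySem.List.min? (gs.map PySem.Str.len) (fun x => x)).getD 0)
      (pvMaxCount team gs) ((PySem.List.enumerate gs 0).drop gi)

theorem enum_drop_cons (gs : List String) (gi : Nat) (h : gi < gs.length) :
    (PySem.List.enumerate gs 0).drop gi
      = ((gi : Int), gs[gi]) :: (PySem.List.enumerate gs 0).drop (gi + 1) := by
  have hl : gi < (PySem.List.enumerate gs 0).length := by
    rw [PySem.List.length_enumerate]; exact h
  rw [List.drop_eq_getElem_cons hl, PySem.List.getElem_enumerate]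
  simp

theorem newA_eq_set (gs : List String) (i : Nat) (t : String) (h : i < gs.length) :
    (PySem.List.enumerate gs 0).map (fun p => if (i : Int) ≠ p.1 then p.2 else p.2 ++ t)
      = gs.set i (gs[i] ++ t) := by
  apply List.ext_getElem
  · simp [PySem.List.length_enumerate]
  · intro k h1 h2
    simp only [List.getElem_map, PySem.List.getElem_enumerate, List.getElem_set]
    by_cases hik : i = k
    · subst hik; simp
    · have hik' : (i : Int) ≠ 0 + (k : Int) := by
        simp only [zero_add]
        exact_mod_cast hik
      simp [hik]

theorem newB_eq_set (gs : List String) (j : Nat) (t : String) (h : j < gs.length) :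
    gs.take j ++ (gs.getD j "" ++ t) :: gs.drop (j + 1) = gs.set j (gs[j] ++ t) := by
  rw [List.set_eq_take_cons_drop _ h, List.getD_eq_getElem _ _ h]

-- A's loop skips a group Source B's scan calls illegal …
theorem loopA_skip (team : String) (rest gs : List String) (mL mC : Int) (i : Int)
    (group : String) (tl : List (Int × String))
    (hc : pvIllegal team mL mC group = true) :
    loopA team rest gs mL mC ((i, group) :: tl) = loopA team rest gs mL mC tl := by
  conv_lhs => unfold loopA
  simp only [pvIllegal, Bool.or_eq_true, decide_eq_true_eq] at hc
  by_cases h1 : PySem.Str.len group > mL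
  · rw [if_pos h1]
  · rw [if_neg h1]
    rcases hc with h | h
    · exact absurd h h1
    · rw [if_pos h]

-- … and at a legal group places the team and recurses, exactly as A does
theorem loopA_hit (team : String) (rest gs : List String) (mL mC : Int) (i : Int)
    (group : String) (tl : List (Int × String))
    (hc : pvIllegal team mL mC group = false) :
    loopA team rest gs mL mC ((i, group) :: tl)
      = (match draw_pot rest
            ((PySem.List.enumerate gs 0).map (fun p => if i ≠ p.1 then p.2 else p.2 ++ team)) with
         | some r => if r.isEmpty then loopA team rest gs mL mC tl else some r
         | none => loopA team rest gs mL mC tl) := by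
  conv_lhs => unfold loopA
  simp only [pvIllegal, Bool.or_eq_false_iff, decide_eq_false_iff_not] at hc
  rw [if_neg hc.1, if_neg hc.2]

theorem loopA_length (rest : List String)
    (IH : ∀ gs' r, draw_pot rest gs' = some r → r.length = gs'.length) :
    ∀ (team : String) (gs : List String) (mL mC : Int) (pairs : List (Int × String)) r,
      loopA team rest gs mL mC pairs = some r → r.length = gs.length := by
  intro team gs mL mC pairs
  induction pairs with
  | nil => intro r h; simp [loopA] at h
  | cons p tl ihp =>
    obtain ⟨i, group⟩ := p
    intro r h
    cases hc : pvIllegal team mL mC group with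
    | true =>
      rw [loopA_skip team rest gs mL mC i group tl hc] at h
      exact ihp r h
    | false =>
      rw [loopA_hit team rest gs mL mC i group tl hc] at h
      cases hd : draw_pot rest
          ((PySem.List.enumerate gs 0).map (fun p => if i ≠ p.1 then p.2 else p.2 ++ team)) with
      | none =>
        rw [hd] at h
        exact ihp r h
      | some r' =>
        rw [hd] at h
        dsimp only at h
        split_ifs at h with he
        · exact ihp r h
        · cases h
          rw [IH _ r hd]
          simp [PySem.List.length_enumerate]

theorem draw_pot_length : ∀ (pots gs r : List String),
    draw_pot pots gs = some r → r.length = gs.length := by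
  intro pots
  induction pots with
  | nil => intro gs r h; unfold draw_pot at h; cases h; rfl
  | cons team rest ih =>
    intro gs r h
    unfold draw_pot at h
    cases hm : PySem.List.min? (gs.map PySem.Str.len) (fun x => x) with
    | none => rw [hm] at h; exact absurd h (by simp)
    | some m =>
      rw [hm] at h
      exact loopA_length rest ih team gs m (pvMaxCount team gs) _ r h

-- Source B's scan finds no legal group from gi on  ⇒  A's loop restarted at gi fails
theorem loopA_scan_none (team : String) (rest gs : List String) (mL mC : Int) :
    ∀ (n gi : Nat), gs.length ≤ gi + n → scanB team mL mC gs gi = none →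
      loopA team rest gs mL mC ((PySem.List.enumerate gs 0).drop gi) = none := by
  intro n
  induction n with
  | zero =>
    intro gi hb _
    rw [List.drop_of_length_le (by rw [PySem.List.length_enumerate]; omega)]
    simp [loopA]
  | succ n ihn =>
    intro gi hb h
    by_cases hlt : gi < gs.length
    · unfold scanB at h
      rw [dif_pos hlt] at h
      cases hc : pvIllegal team mL mC gs[gi] with
      | true =>
        rw [if_pos hc] at h
        rw [enum_drop_cons gs gi hlt, loopA_skip team rest gs mL mC _ _ _ hc]
        exact ihn (gi + 1) (by omega) h
      | false =>
        rw [if_neg (by simp [hc])] at h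
        exact absurd h (by simp)
    · rw [List.drop_of_length_le (by rw [PySem.List.length_enumerate]; omega)]
      simp [loopA]

-- Source B's scan finds the first legal group j  ⇒  A's loop restarted at gi reaches exactly j,
-- recurses on the same new groups, and on failure resumes at j+1
theorem loopA_scan_some (team : String) (rest gs : List String) (mL mC : Int) :
    ∀ (n gi j : Nat), gs.length ≤ gi + n → scanB team mL mC gs gi = some j →
      loopA team rest gs mL mC ((PySem.List.enumerate gs 0).drop gi)
        = (match draw_pot rest (gs.set j (gs.getD j "" ++ team)) with
           | some r => if r.isEmpty then
               loopA team rest gs mL mC ((PySem.List.enumerate gs 0).drop (j + 1)) else some r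
           | none => loopA team rest gs mL mC ((PySem.List.enumerate gs 0).drop (j + 1))) := by
  intro n
  induction n with
  | zero =>
    intro gi j hb h
    unfold scanB at h
    rw [dif_neg (by omega)] at h
    exact absurd h (by simp)
  | succ n ihn =>
    intro gi j hb h
    by_cases hlt : gi < gs.length
    · unfold scanB at h
      rw [dif_pos hlt] at h
      cases hc : pvIllegal team mL mC gs[gi] with
      | true =>
        rw [if_pos hc] at h
        rw [enum_drop_cons gs gi hlt, loopA_skip team rest gs mL mC _ _ _ hc]
        exact ihn (gi + 1) j (by omega) h
      | false =>
        rw [if_neg (by simp [hc])] at h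
        cases h
        rw [enum_drop_cons gs gi hlt, loopA_hit team rest gs mL mC _ _ _ hc,
            newA_eq_set gs gi team hlt, ← List.getD_eq_getElem gs "" hlt]
    · unfold scanB at h
      rw [dif_neg hlt] at h
      exact absurd h (by simp)

theorem frameEval_eq_draw (pots gs : List String) (hne : gs ≠ []) :
    frameEval pots gs 0 = draw_pot pots gs := by
  cases pots with
  | nil => simp [frameEval, draw_pot]
  | cons team rest =>
    unfold frameEval draw_pot
    cases hm : PySem.List.min? (gs.map PySem.Str.len) (fun x => x) with
    | none =>
      rw [PySem.List.min?_eq_none_iff] at hm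
      exact absurd (List.map_eq_nil_iff.mp hm) hne
    | some m => simp

-- equation lemmas for the fuelled dfsB
theorem dfsB_empty (f : Nat) : dfsB f [] = none := by cases f <;> rfl

theorem dfsB_done (f : Nat) (gs : List String) (gi : Nat)
    (tl : List (List String × List String × Nat)) :
    dfsB (f + 1) (([], gs, gi) :: tl) = some gs := rfl

theorem dfsB_cons (f : Nat) (team : String) (rest gs : List String) (gi : Nat)
    (tl : List (List String × List String × Nat)) :
    dfsB (f + 1) ((team :: rest, gs, gi) :: tl)
      = (match scanB team ((PySem.List.min? (gs.map PySem.Str.len) (fun x => x)).getD 0)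
            (pvMaxCount team gs) gs gi with
         | none => dfsB f tl
         | some j => dfsB f ((rest, gs.take j ++ (gs.getD j "" ++ team) :: gs.drop (j + 1), 0)
              :: (team :: rest, gs, j + 1) :: tl)) := rfl

-- popping one frame: given enough fuel, the DFS returns that frame's backtracking value,
-- else falls through to the rest of the stack (with any sufficient fuel g for it)
theorem dfsB_bridge : ∀ (W : Nat) (pots gs : List String) (gi : Nat)
    (tl : List (List String × List String × Nat)) (fuel g : Nat),
    (((pots, gs, gi) :: tl).map pvFrameW).sum ≤ W →
    (((pots, gs, gi) :: tl).map pvFrameW).sum < fuel →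
    (tl.map pvFrameW).sum < g →
    dfsB fuel ((pots, gs, gi) :: tl)
      = (match frameEval pots gs gi with
         | some r => some r
         | none => dfsB g tl) := by
  intro W
  induction W with
  | zero =>
    intro pots gs gi tl fuel g hW _ _
    exfalso
    simp only [List.map_cons, List.sum_cons, pvFrameW] at hW
    omega
  | succ W ihW =>
    intro pots gs gi tl fuel g hW hf hg
    have hw1 : 1 ≤ pvFrameW (pots, gs, gi) := Nat.le_add_left 1 _
    have hfu : 0 < fuel := by
      simp only [List.map_cons, List.sum_cons] at hf
      omega
    obtain ⟨f', rfl⟩ : ∃ f', fuel = f' + 1 := ⟨fuel - 1, by omega⟩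
    cases pots with
    | nil => rw [dfsB_done]; rfl
    | cons team rest =>
      rw [dfsB_cons]
      simp only [List.map_cons, List.sum_cons] at hW hf hg
      cases hscan : scanB team ((PySem.List.min? (gs.map PySem.Str.len) (fun x => x)).getD 0)
          (pvMaxCount team gs) gs gi with
      | none =>
        dsimp only
        have hfe : frameEval (team :: rest) gs gi = none := by
          unfold frameEval
          dsimp only
          exact loopA_scan_none team rest gs _ _ gs.length gi (by omega) hscan
        rw [hfe]
        cases tl with
        | nil => rw [dfsB_empty, dfsB_empty]
        | cons fr2 tl2 =>
          obtain ⟨p2, g2, i2⟩ := fr2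
          simp only [List.map_cons, List.sum_cons] at hW hf hg
          rw [ihW p2 g2 i2 tl2 f' ((tl2.map pvFrameW).sum + 1)
                (by simp only [List.map_cons, List.sum_cons]; omega)
                (by simp only [List.map_cons, List.sum_cons]; omega) (by omega),
              ihW p2 g2 i2 tl2 g ((tl2.map pvFrameW).sum + 1)
                (by simp only [List.map_cons, List.sum_cons]; omega)
                (by simp only [List.map_cons, List.sum_cons]; omega) (by omega)]
      | some j =>
        dsimp only
        obtain ⟨h1, h2⟩ := scanB_bounds _ _ _ _ _ _ hscan
        have hset : gs.take j ++ (gs.getD j "" ++ team) :: gs.drop (j + 1)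
            = gs.set j (gs.getD j "" ++ team) := by
          rw [newB_eq_set gs j team h2, List.getD_eq_getElem gs "" h2]
        rw [hset]
        have hlenset : (gs.set j (gs.getD j "" ++ team)).length = gs.length :=
          List.length_set ..
        have hne : gs.set j (gs.getD j "" ++ team) ≠ [] := by
          intro hx
          rw [hx] at hlenset
          simp at hlenset
          omega
        have key := pvFrameW_dec team rest gs (gs.set j (gs.getD j "" ++ team)) gi j hlenset h1 h2
        rw [ihW rest (gs.set j (gs.getD j "" ++ team)) 0 ((team :: rest, gs, j + 1) :: tl) f'
              ((((team :: rest, gs, j + 1) :: tl).map pvFrameW).sum + 1)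
              (by simp only [List.map_cons, List.sum_cons]; omega)
              (by simp only [List.map_cons, List.sum_cons]; omega)
              (by omega)]
        rw [frameEval_eq_draw rest _ hne]
        have hfe : frameEval (team :: rest) gs gi
            = (match draw_pot rest (gs.set j (gs.getD j "" ++ team)) with
               | some r => if r.isEmpty then frameEval (team :: rest) gs (j + 1) else some r
               | none => frameEval (team :: rest) gs (j + 1)) := by
          unfold frameEval
          dsimp only
          exact loopA_scan_some team rest gs _ _ gs.length gi j (by omega) hscan
        rw [hfe]
        cases hd : draw_pot rest (gs.set j (gs.getD j "" ++ team)) with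
        | some r =>
          have hr : r.length = gs.length := by rw [draw_pot_length rest _ r hd, hlenset]
          have hrne : r.isEmpty = false := by
            rw [List.isEmpty_eq_false_iff]
            intro hx
            rw [hx] at hr
            simp at hr
            omega
          simp [hrne]
        | none =>
          dsimp only
          rw [ihW (team :: rest) gs (j + 1) tl
                ((((team :: rest, gs, j + 1) :: tl).map pvFrameW).sum + 1) g
                (by simp only [List.map_cons, List.sum_cons]; omega)
                (by omega) (by omega)]

-- ===== VERDICT (by name: the statement is the Claim_ definition above) =====
theorem draw_pot_spec : Claim_equal_draw_pot := by
  intro pot groups _ hpre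
  unfold Spec_draw_pot draw_pot_alt
  rw [dfsB_bridge (([(pot, groups, 0)]).map pvFrameW).sum pot groups 0 []
        (pvFrameW (pot, groups, 0) + 1) 1
        (Nat.le_refl _) (by simp) (by simp)]
  cases pot with
  | nil => simp [draw_pot, frameEval]
  | cons team rest =>
    have hne : groups ≠ [] := by
      rcases hpre with h | h
      · exact absurd h (by simp)
      · exact h
    rw [frameEval_eq_draw (team :: rest) groups hne]
    cases hd : draw_pot (team :: rest) groups with
    | none => simp [dfsB_empty]
    | some r => simp
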